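-- pv_equiv track=rewrite | github.com/GustLucas/Athena | Athena.py | formata_comando
-- ===== SOURCE A (Python) =====
-- def formata_comando(frase):
--     # comandos que podem ser usados
--     comandos = ["pesquisar por", "pesquise por", "pesquisa aí", "abrir", "abra", "abrir o", "abrir a", "abra o",
--                 "abra a", "abre o", "abre a"]
--
--     comandos = sorted(comandos, key=len, reverse=True)
--     for comando in comandos:
--         if comando in frase:
--             posicao_comando = frase.find(comando)
--             return frase[posicao_comando + len(comando):].strip()
--     return frase
-- ===== SOURCE B (Python) =====
-- def formata_comando(frase):
--     # comandos que podem ser usados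
--     comandos = ["pesquisar por", "pesquise por", "pesquisa aí", "abrir", "abra", "abrir o", "abrir a", "abra o",
--                 "abra a", "abre o", "abre a"]
--
--     # single pass: keep the longest command found in frase (earlier entries win ties)
--     melhor = None
--     for comando in comandos:
--         if comando in frase and (melhor is None or len(comando) > len(melhor)):
--             melhor = comando
--     if melhor is None:
--         return frase
--     return frase[frase.find(melhor) + len(melhor):].strip()
-- ===== Notes on version B (the rewrite author's own statement) =====
-- stated objective: simpler
-- what changed: Drops the length-descending sort entirely: a single pass over the commands in original order keeps the longest command contained in frase (strict > so earlier entries win ties, matching the stable sort), then strips the suffix after its first occurrence.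
import Mathlib
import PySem

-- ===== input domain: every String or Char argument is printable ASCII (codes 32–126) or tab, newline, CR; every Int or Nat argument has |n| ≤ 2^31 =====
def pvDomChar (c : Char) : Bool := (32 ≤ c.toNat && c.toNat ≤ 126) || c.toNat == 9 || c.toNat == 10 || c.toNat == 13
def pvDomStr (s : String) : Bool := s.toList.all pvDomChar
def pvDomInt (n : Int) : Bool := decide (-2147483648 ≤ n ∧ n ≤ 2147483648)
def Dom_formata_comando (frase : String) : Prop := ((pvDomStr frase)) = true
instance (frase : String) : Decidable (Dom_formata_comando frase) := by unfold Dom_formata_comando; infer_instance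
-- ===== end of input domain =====

-- B replaces A's sort-then-first-match scan with a single max-selection pass over the
-- original command list (objective: simpler; same result, ties resolved to earlier entries).

-- shared literal data: the command list, and the common return expression
-- frase[frase.find(c) + len(c):].strip() both Pythons contain verbatim
def fcCmds : List String := ["pesquisar por", "pesquise por", "pesquisa aí", "abrir", "abra",
  "abrir o", "abrir a", "abra o", "abra a", "abre o", "abre a"]

def fcTail (frase c : String) : String :=
  PySem.Str.strip (PySem.Str.slice frase (some (PySem.Str.find frase c + (PySem.Str.len c : Int))) none)

-- ===== PORT A =====
def fcLoopA (frase : String) : List String → String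
  | [] => frase
  | c :: rest => if PySem.Str.isIn c frase then fcTail frase c else fcLoopA frase rest

def formata_comando (frase : String) : String :=
  fcLoopA frase (PySem.List.sorted fcCmds (fun c => PySem.Str.len c) true)

-- ===== PORT B =====
def fcStep (frase : String) (melhor : Option String) (c : String) : Option String :=
  if PySem.Str.isIn c frase &&
      (match melhor with
       | none => true
       | some m => decide (PySem.Str.len m < PySem.Str.len c)) then
    some c
  else melhor

def fcBest (frase : String) : Option String := fcCmds.foldl (fcStep frase) none

def formata_comando_alt (frase : String) : String :=
  match fcBest frase with
  | none => frase
  | some m => fcTail frase m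

-- ===== PRECONDITION & SPEC =====
def Spec_formata_comando (frase : String) (out : String) : Prop := out = formata_comando_alt frase
instance (frase : String) (out : String) : Decidable (Spec_formata_comando frase out) := by unfold Spec_formata_comando; infer_instance

-- ===== CLAIM (what is proved, stated in full; the proofs are below) =====
def Claim_equal_formata_comando : Prop := ∀ (frase : String), Dom_formata_comando frase → Spec_formata_comando frase (formata_comando frase)

-- ===== LEMMAS AND PROOFS =====

-- the stable length-descending sort of the literal command list, named explicitly
theorem fc_sorted :
    PySem.List.sorted fcCmds (fun c => PySem.Str.len c) true =
      ["pesquisar por", "pesquise por", "pesquisa aí", "abrir o", "abrir a",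
       "abra o", "abra a", "abre o", "abre a", "abrir", "abra"] := by
  decide

-- ===== VERDICT (by name: the statement is the Claim_ definition above) =====
theorem formata_comando_spec : Claim_equal_formata_comando := by
  intro frase _
  show formata_comando frase = formata_comando_alt frase
  rw [formata_comando, fc_sorted]
  by_cases h1 : PySem.Chars.isIn ['p','e','s','q','u','i','s','a','r',' ','p','o','r'] frase.toList = true
  · simp_all [fcLoopA, formata_comando_alt, fcBest, fcStep, fcCmds]
  by_cases h2 : PySem.Chars.isIn ['p','e','s','q','u','i','s','e',' ','p','o','r'] frase.toList = true
  · simp_all [fcLoopA, formata_comando_alt, fcBest, fcStep, fcCmds]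
  by_cases h3 : PySem.Chars.isIn ['p','e','s','q','u','i','s','a',' ','a','í'] frase.toList = true
  · simp_all [fcLoopA, formata_comando_alt, fcBest, fcStep, fcCmds]
  by_cases hr : PySem.Chars.isIn ['a','b','r','i','r'] frase.toList = true <;>
  by_cases ha : PySem.Chars.isIn ['a','b','r','a'] frase.toList = true <;>
  (by_cases h4 : PySem.Chars.isIn ['a','b','r','i','r',' ','o'] frase.toList = true
   · simp_all [fcLoopA, formata_comando_alt, fcBest, fcStep, fcCmds]
   by_cases h5 : PySem.Chars.isIn ['a','b','r','i','r',' ','a'] frase.toList = true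
   · simp_all [fcLoopA, formata_comando_alt, fcBest, fcStep, fcCmds]
   by_cases h6 : PySem.Chars.isIn ['a','b','r','a',' ','o'] frase.toList = true
   · simp_all [fcLoopA, formata_comando_alt, fcBest, fcStep, fcCmds]
   by_cases h7 : PySem.Chars.isIn ['a','b','r','a',' ','a'] frase.toList = true
   · simp_all [fcLoopA, formata_comando_alt, fcBest, fcStep, fcCmds]
   by_cases h8 : PySem.Chars.isIn ['a','b','r','e',' ','o'] frase.toList = true
   · simp_all [fcLoopA, formata_comando_alt, fcBest, fcStep, fcCmds]
   by_cases h9 : PySem.Chars.isIn ['a','b','r','e',' ','a'] frase.toList = true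
   · simp_all [fcLoopA, formata_comando_alt, fcBest, fcStep, fcCmds]
   simp_all [fcLoopA, formata_comando_alt, fcBest, fcStep, fcCmds])
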